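-- pv_equiv track=rewrite | github.com/cyliatabti6-gif/TimeBank-Edu | backend/accounts/meet_url_validation.py | meet_url_hostname_trusted
-- ===== SOURCE A (Python) =====
-- _ALLOWED_HOST_SUFFIXES: tuple[str, ...] = (
--     "meet.google.com",
--     "zoom.us",
--     "zoom.com",
--     "zoomgov.com",
--     "teams.microsoft.com",
--     "teams.live.com",
--     "webex.com",
--     "whereby.com",
--     "jit.si",
-- )
--
-- def meet_url_hostname_trusted(hostname: str) -> bool:
--     h = (hostname or "").strip().lower()
--     if not h:
--         return False
--     for suf in _ALLOWED_HOST_SUFFIXES: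
--         if h == suf or h.endswith("." + suf):
--             return True
--     return False
-- ===== SOURCE B (Python) =====
-- _ALLOWED_HOSTS = frozenset((
--     "meet.google.com",
--     "zoom.us",
--     "zoom.com",
--     "zoomgov.com",
--     "teams.microsoft.com",
--     "teams.live.com",
--     "webex.com",
--     "whereby.com",
--     "jit.si",
-- ))
--
-- def meet_url_hostname_trusted(hostname: str) -> bool:
--     h = (hostname or "").strip().lower()
--     if not h:
--         return False
--     if h in _ALLOWED_HOSTS:
--         return True
--     for j in range(len(h)):
--         if h[j] == "." and h[j + 1:] in _ALLOWED_HOSTS: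
--             return True
--     return False
-- ===== Notes on version B (the rewrite author's own statement) =====
-- stated objective: alternative
-- what changed: B iterates over the hostname's own label-boundary suffixes and tests each with a frozenset lookup, instead of scanning the allowlist and calling endswith for each entry.
import Mathlib
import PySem

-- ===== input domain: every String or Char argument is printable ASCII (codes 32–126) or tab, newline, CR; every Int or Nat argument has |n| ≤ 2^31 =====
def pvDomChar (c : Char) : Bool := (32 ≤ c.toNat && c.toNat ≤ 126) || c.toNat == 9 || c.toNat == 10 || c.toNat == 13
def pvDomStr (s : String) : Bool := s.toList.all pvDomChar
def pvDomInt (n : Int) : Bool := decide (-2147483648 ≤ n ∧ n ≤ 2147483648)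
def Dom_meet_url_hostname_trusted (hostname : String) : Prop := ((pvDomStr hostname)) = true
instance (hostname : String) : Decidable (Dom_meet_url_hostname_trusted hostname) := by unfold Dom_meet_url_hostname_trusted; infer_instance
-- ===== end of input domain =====

-- B checks the hostname's own label-boundary suffixes against a set instead of scanning the allowlist with endswith; same results, different traversal.

-- ===== PORT A =====
-- _ALLOWED_HOST_SUFFIXES
def pvSuffixes : List String :=
  ["meet.google.com", "zoom.us", "zoom.com", "zoomgov.com",
   "teams.microsoft.com", "teams.live.com", "webex.com", "whereby.com", "jit.si"]

def meet_url_hostname_trusted (hostname : String) : Bool :=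
  let h := PySem.Str.lower (PySem.Str.strip hostname)
  if h == "" then false
  else pvSuffixes.any (fun suf => h == suf || PySem.Str.endswith h ("." ++ suf))

-- ===== PORT B =====
-- _ALLOWED_HOSTS = frozenset(...)  (the same nine literals)
def pvAllowed : PySem.Set String := PySem.Set.ofList pvSuffixes

def meet_url_hostname_trusted_alt (hostname : String) : Bool :=
  let h := PySem.Str.lower (PySem.Str.strip hostname)
  if h == "" then false
  else if pvAllowed.contains h then true
  else (PySem.List.pyRange 0 (PySem.Str.len h)).any (fun j =>
    PySem.Str.pyGet? h j == some '.' && pvAllowed.contains (PySem.Str.slice h (some (j + 1)) none))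

-- ===== PRECONDITION & SPEC =====
def Spec_meet_url_hostname_trusted (hostname : String) (out : Bool) : Prop := out = meet_url_hostname_trusted_alt hostname
instance (hostname : String) (out : Bool) : Decidable (Spec_meet_url_hostname_trusted hostname out) := by unfold Spec_meet_url_hostname_trusted; infer_instance

-- ===== CLAIM (what is proved, stated in full; the proofs are below) =====
def Claim_equal_meet_url_hostname_trusted : Prop := ∀ (hostname : String), Dom_meet_url_hostname_trusted hostname → Spec_meet_url_hostname_trusted hostname (meet_url_hostname_trusted hostname)

-- ===== LEMMAS AND PROOFS =====

-- a '.'-preceded suffix of cs is exactly a tail cut at an index holding '.'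
theorem pv_dot_suffix_iff (cs suf : List Char) :
    ('.' :: suf) <:+ cs ↔ ∃ j : ℕ, j < cs.length ∧ cs[j]? = some '.' ∧ cs.drop (j + 1) = suf := by
  constructor
  · rintro ⟨t, ht⟩
    refine ⟨t.length, ?_, ?_, ?_⟩
    · subst ht; simp
    · subst ht; simp
    · subst ht
      have h1 : t.length + 1 = (t ++ ['.']).length := by simp
      rw [h1, show t ++ '.' :: suf = (t ++ ['.']) ++ suf by simp, List.drop_left]
  · rintro ⟨j, hj, hget, hdrop⟩
    have h1 : cs.drop j = '.' :: suf := by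
      rw [List.drop_eq_getElem_cons hj]
      have h2 : cs[j] = '.' := by
        have h3 := List.getElem?_eq_getElem hj
        rw [h3] at hget; exact Option.some.inj hget
      rw [h2, hdrop]
    exact h1 ▸ List.drop_suffix j cs

theorem pv_ports_agree (hostname : String) :
    meet_url_hostname_trusted hostname = meet_url_hostname_trusted_alt hostname := by
  unfold meet_url_hostname_trusted meet_url_hostname_trusted_alt
  set h := PySem.Str.lower (PySem.Str.strip hostname) with hh
  by_cases h0 : h == ""
  · simp [h0]
  · simp only [h0, Bool.false_eq_true, if_false]
    have hdot : ("." : String).toList = ['.'] := rfl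
    by_cases hc : pvAllowed.contains h = true
    · have hmem : h ∈ pvSuffixes := (PySem.Set.mem_ofList _ _).mp ((PySem.Set.contains_iff _ _).mp hc)
      simp only [hc, if_true, List.any_eq_true]
      exact ⟨h, hmem, by simp⟩
    · have hnot : h ∉ pvSuffixes := fun hm =>
        hc ((PySem.Set.contains_iff _ _).mpr ((PySem.Set.mem_ofList _ _).mpr hm))
      rw [Bool.not_eq_true] at hc
      simp only [hc, Bool.false_eq_true, if_false]
      rw [Bool.eq_iff_iff]
      simp only [List.any_eq_true, Bool.or_eq_true, beq_iff_eq, PySem.Str.endswith_eq,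
        PySem.Chars.endswith_iff, String.toList_append, hdot, List.singleton_append,
        Bool.and_eq_true, PySem.Set.contains_iff, pvAllowed, PySem.Set.mem_ofList,
        PySem.List.mem_pyRange_one, PySem.Str.len_eq]
      constructor
      · rintro ⟨suf, hmem, hEq | hSuf⟩
        · exact absurd (hEq ▸ hmem) hnot
        · rw [pv_dot_suffix_iff] at hSuf
          obtain ⟨j, hj, hget, hdrop⟩ := hSuf
          refine ⟨(j : Int), ⟨by omega, by omega⟩, ?_, ?_⟩
          · rw [PySem.Str.pyGet?_natCast]; simp [hget]
          · have hsl : (PySem.Str.slice h (some ((j : Int) + 1)) none).toList = suf.toList := by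
              rw [PySem.Str.toList_slice, PySem.Chars.slice_eq_listSlice,
                show ((j : Int) + 1) = ((j + 1 : ℕ) : Int) by push_cast; ring,
                PySem.List.slice_from_natCast, hdrop]
            rw [String.toList_inj] at hsl
            rwa [hsl]
      · rintro ⟨j, ⟨hj0, hjlt⟩, hget, hmem⟩
        refine ⟨PySem.Str.slice h (some (j + 1)) none, hmem, Or.inr ?_⟩
        rw [pv_dot_suffix_iff]
        refine ⟨j.toNat, by omega, ?_, ?_⟩
        · rw [show (j : Int) = ((j.toNat : ℕ) : Int) by omega, PySem.Str.pyGet?_natCast] at hget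
          simpa using hget
        · rw [PySem.Str.toList_slice, PySem.Chars.slice_eq_listSlice,
            show (j + 1 : Int) = ((j.toNat + 1 : ℕ) : Int) by omega,
            PySem.List.slice_from_natCast]

-- ===== VERDICT (by name: the statement is the Claim_ definition above) =====
theorem meet_url_hostname_trusted_spec : Claim_equal_meet_url_hostname_trusted := by
  intro hostname _
  unfold Spec_meet_url_hostname_trusted
  exact pv_ports_agree hostname
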